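-- pv_equiv track=rewrite | github.com/damianoimola/fundamentals-of-it-exercises | recursion_excercise.py | isSumOdd
-- ===== SOURCE A (Python) =====
-- def isSumOdd(l):
-- # @param L : list
-- # @return bool
--     if len(l)==0:
--         return True
--     elif len(l)==1:
--         return l[0]%2==0
--     else:
--         if not isSumOdd(l[1:]):
--             if l[0]%2!=0:
--                 return True
--             else:
--                 return False
--         else:
--             return l[0]%2==0
-- ===== SOURCE B (Python) =====
-- def isSumOdd(l):
--     # iterative parity toggle instead of recursion
--     odd = False
--     for x in l:
--         if x % 2 != 0:
--             odd = not odd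
--     return not odd
-- ===== Notes on version B (the rewrite author's own statement) =====
-- stated objective: simpler
-- what changed: Replaces the recursion on the tail with a single iterative pass that toggles a boolean parity flag per odd element.
import Mathlib
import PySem

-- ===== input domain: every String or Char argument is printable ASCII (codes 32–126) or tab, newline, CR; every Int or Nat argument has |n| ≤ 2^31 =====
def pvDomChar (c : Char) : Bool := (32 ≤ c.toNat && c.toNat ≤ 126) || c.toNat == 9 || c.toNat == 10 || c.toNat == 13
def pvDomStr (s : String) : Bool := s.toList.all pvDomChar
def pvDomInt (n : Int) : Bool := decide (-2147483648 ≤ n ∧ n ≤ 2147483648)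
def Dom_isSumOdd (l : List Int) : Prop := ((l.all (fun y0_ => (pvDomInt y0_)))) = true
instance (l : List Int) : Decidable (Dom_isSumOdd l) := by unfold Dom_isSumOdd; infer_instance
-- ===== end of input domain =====

-- B replaces A's tail recursion (with O(n) slicing per step) by one iterative pass toggling a parity flag.

-- ===== PORT A =====
def isSumOdd (l : List Int) : Bool :=
  match l with
  | [] => true
  | [x] => PySem.Int.mod x 2 == 0
  | x :: rest =>
    if !(isSumOdd rest) then
      if PySem.Int.mod x 2 != 0 then true else false
    else
      PySem.Int.mod x 2 == 0


-- ===== PORT B =====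
-- loop body of Source B's for-loop
def pvF (odd : Bool) (x : Int) : Bool := if PySem.Int.mod x 2 != 0 then !odd else odd

def isSumOdd_alt (l : List Int) : Bool :=
  !(l.foldl pvF false)

-- ===== PRECONDITION & SPEC =====
def Spec_isSumOdd (l : List Int) (out : Bool) : Prop := out = isSumOdd_alt l
instance (l : List Int) (out : Bool) : Decidable (Spec_isSumOdd l out) := by unfold Spec_isSumOdd; infer_instance

-- ===== CLAIM (what is proved, stated in full; the proofs are below) =====
def Claim_equal_isSumOdd : Prop := ∀ (l : List Int), Dom_isSumOdd l → Spec_isSumOdd l (isSumOdd l)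

-- ===== LEMMAS AND PROOFS =====

-- the fold commutes with negating the accumulator
theorem pv_foldl_not (l : List Int) (b : Bool) :
    l.foldl pvF (!b) = !(l.foldl pvF b) := by
  induction l generalizing b with
  | nil => rfl
  | cons x rest ih =>
    simp only [List.foldl_cons]
    have hx : pvF (!b) x = !(pvF b x) := by
      unfold pvF; cases (PySem.Int.mod x 2 != 0) <;> simp
    rw [hx]; exact ih (pvF b x)

theorem pv_foldl_true (l : List Int) :
    l.foldl pvF true = !(l.foldl pvF false) := by
  have := pv_foldl_not l false; simpa using this

theorem pv_eq (l : List Int) : isSumOdd l = isSumOdd_alt l := by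
  induction l with
  | nil => rfl
  | cons x rest ih =>
    cases rest with
    | nil =>
      show (PySem.Int.mod x 2 == 0) = !(pvF false x)
      unfold pvF
      have hbne : (PySem.Int.mod x 2 != 0) = !(PySem.Int.mod x 2 == 0) := rfl
      cases h : (PySem.Int.mod x 2 == 0)
      · have hc : (PySem.Int.mod x 2 != 0) = true := by rw [hbne, h]; rfl
        rw [hc]; simp
      · have hc : (PySem.Int.mod x 2 != 0) = false := by rw [hbne, h]; rfl
        rw [hc]; simp
    | cons y t =>
      have step : isSumOdd (x :: y :: t)
          = if !(isSumOdd (y :: t)) then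
              (if PySem.Int.mod x 2 != 0 then true else false)
            else (PySem.Int.mod x 2 == 0) := rfl
      have hx : pvF false x = (PySem.Int.mod x 2 != 0) := by
        unfold pvF; cases (PySem.Int.mod x 2 != 0) <;> rfl
      rw [step, ih]
      show _ = !((y :: t).foldl pvF (pvF false x))
      rw [hx]
      have hbne : (PySem.Int.mod x 2 != 0) = !(PySem.Int.mod x 2 == 0) := rfl
      cases h : (PySem.Int.mod x 2 == 0)
      · have hc : (PySem.Int.mod x 2 != 0) = true := by rw [hbne, h]; rfl
        rw [hc, pv_foldl_true]
        unfold isSumOdd_alt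
        cases (List.foldl pvF false (y :: t)) <;> simp
      · have hc : (PySem.Int.mod x 2 != 0) = false := by rw [hbne, h]; rfl
        rw [hc]
        unfold isSumOdd_alt
        cases (List.foldl pvF false (y :: t))
        case false => simp [h]
        case true => simp

-- ===== VERDICT (by name: the statement is the Claim_ definition above) =====
theorem isSumOdd_spec : Claim_equal_isSumOdd := by
  intro l _
  unfold Spec_isSumOdd
  exact pv_eq l
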